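-- pv_equiv track=rewrite | github.com/estadtdaniel/Mooc-Fi-2025-answers | Week 4/all_longest_in_list.py | all_the_longest
-- ===== SOURCE A (Python) =====
-- def all_the_longest(words):
--     long = len(words[0])
--     long_word = []
--     for item in words:
--         if len(item) > long:
--             long = len(item)
--
--     for item in words:
--         if len(item) == long:
--             long_word.append(item)
--     return long_word
-- ===== SOURCE B (Python) =====
-- def all_the_longest(words):
--     long = len(words[0])
--     result = []
--     for item in words:
--         n = len(item)
--         if n > long:
--             long = n
--             result = [item]
--         elif n == long:
--             result.append(item)
--     return result
-- ===== Notes on version B (the rewrite author's own statement) =====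
-- stated objective: simpler
-- what changed: A's two scans (first find the max length, then collect words of that length) are merged into one pass keeping a running max plus a candidate list that is reset when a longer word appears.
import Mathlib
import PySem

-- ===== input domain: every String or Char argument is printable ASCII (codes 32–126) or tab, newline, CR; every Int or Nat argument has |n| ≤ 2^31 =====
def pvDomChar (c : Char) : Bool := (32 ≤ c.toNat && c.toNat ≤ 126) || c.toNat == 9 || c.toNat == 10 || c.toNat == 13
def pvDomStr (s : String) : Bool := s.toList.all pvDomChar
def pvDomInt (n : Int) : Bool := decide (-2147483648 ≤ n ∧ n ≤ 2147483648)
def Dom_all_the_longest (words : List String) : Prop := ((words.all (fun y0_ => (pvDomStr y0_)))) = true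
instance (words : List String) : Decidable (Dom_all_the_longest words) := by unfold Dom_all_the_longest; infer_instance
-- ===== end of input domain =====

-- B merges A's two scans into one pass with a running max and a candidate list reset on a longer word.
-- ===== PORT A =====
-- A's first loop body: 'if len(item) > long: long = len(item)'
def pvMaxStep (l : Int) (item : String) : Int :=
  if PySem.Str.len item > l then PySem.Str.len item else l

-- A's second loop body: 'if len(item) == long: long_word.append(item)'
def pvCollectStep (long : Int) (acc : List String) (item : String) : List String :=
  if PySem.Str.len item = long then acc ++ [item] else acc

def all_the_longest (words : List String) : List String :=
  match words with
  | [] => []  -- Python raises IndexError on words[0]; excluded by Pre_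
  | w0 :: _ =>
    let long := words.foldl pvMaxStep (PySem.Str.len w0)
    words.foldl (pvCollectStep long) []

-- ===== PORT B =====
-- B's loop body: reset the candidate list on a strictly longer word, append on a tie
def pvBStep (st : Int × List String) (item : String) : Int × List String :=
  let n := PySem.Str.len item
  if n > st.1 then (n, [item])
  else if n = st.1 then (st.1, st.2 ++ [item])
  else st

def all_the_longest_alt (words : List String) : List String :=
  match words with
  | [] => []  -- Python raises IndexError on words[0]; excluded by Pre_
  | w0 :: _ => (words.foldl pvBStep (PySem.Str.len w0, [])).2

-- ===== PRECONDITION & SPEC =====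
-- Pre_ excludes only the empty list, on which both Pythons raise IndexError at words[0].
def Pre_all_the_longest (words : List String) : Prop := words ≠ []
instance (words : List String) : Decidable (Pre_all_the_longest words) := by unfold Pre_all_the_longest; infer_instance
def pvWitness_all_the_longest : List String := (["ab", "c", "de"])
def Spec_all_the_longest (words : List String) (out : List String) : Prop := out = all_the_longest_alt words
instance (words : List String) (out : List String) : Decidable (Spec_all_the_longest words out) := by unfold Spec_all_the_longest; infer_instance

-- ===== CLAIM (what is proved, stated in full; the proofs are below) =====
def Claim_equal_all_the_longest : Prop := ∀ (words : List String), Dom_all_the_longest words → Pre_all_the_longest words → Spec_all_the_longest words (all_the_longest words)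

-- ===== LEMMAS AND PROOFS =====

lemma le_foldl_pvMaxStep (ws : List String) (l : Int) :
    l ≤ ws.foldl pvMaxStep l := by
  induction ws generalizing l with
  | nil => simp
  | cons w ws ih =>
    rw [List.foldl_cons]
    refine le_trans ?_ (ih (pvMaxStep l w))
    unfold pvMaxStep; split_ifs with h <;> omega

-- B's loop: first component is the running max, second is the filter of processed items at the final max
lemma alt_foldl_spec (ws : List String) (l : Int) (acc : List String) :
    ws.foldl pvBStep (l, acc)
    = (ws.foldl pvMaxStep l,
       (if ws.foldl pvMaxStep l = l then acc else [])
         ++ ws.filter (fun w => PySem.Str.len w = ws.foldl pvMaxStep l)) := by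
  induction ws generalizing l acc with
  | nil => simp
  | cons w ws ih =>
    rw [List.foldl_cons, List.foldl_cons, List.filter_cons]
    by_cases h1 : PySem.Str.len w > l
    · have hb : pvBStep (l, acc) w = (PySem.Str.len w, [w]) := by
        unfold pvBStep; simp only [if_pos h1]
      have hm : pvMaxStep l w = PySem.Str.len w := by
        unfold pvMaxStep; simp only [if_pos h1]
      rw [hb, ih, hm]
      have hge := le_foldl_pvMaxStep ws (PySem.Str.len w)
      have hne : ws.foldl pvMaxStep (PySem.Str.len w) ≠ l := by omega
      by_cases h2 : ws.foldl pvMaxStep (PySem.Str.len w) = PySem.Str.len w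
      · have h1' : (w.length : Int) > l := by simpa using h1
        simp only [h2]
        simp
        intro h; omega
      · have h2' : ¬ (PySem.Str.len w = ws.foldl pvMaxStep (PySem.Str.len w)) :=
          fun h => h2 h.symm
        simp only [if_neg h2, if_neg hne, List.nil_append, h2', decide_false,
          Bool.false_eq_true, if_false]
    · have hm : pvMaxStep l w = l := by unfold pvMaxStep; simp only [if_neg h1]
      by_cases h2 : PySem.Str.len w = l
      · have hb : pvBStep (l, acc) w = (l, acc ++ [w]) := by
          unfold pvBStep; simp only [if_neg h1, if_pos h2]
        rw [hb, ih, hm]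
        by_cases h3 : ws.foldl pvMaxStep l = l
        · have : PySem.Str.len w = ws.foldl pvMaxStep l := by rw [h3]; exact h2
          simp only [if_pos h3, this, decide_true, if_true]
          simp
        · have hge := le_foldl_pvMaxStep ws l
          have : ¬ ((w.length : Int) = ws.foldl pvMaxStep l) := by
            have h2' : (w.length : Int) = l := by simpa using h2
            omega
          simp [h3, this]
      · have hb : pvBStep (l, acc) w = (l, acc) := by
          unfold pvBStep; simp only [if_neg h1, if_neg h2]
        rw [hb, ih, hm]
        have hge := le_foldl_pvMaxStep ws l
        have h1' : ¬ ((w.length : Int) > l) := by simpa using h1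
        have : ¬ ((w.length : Int) = ws.foldl pvMaxStep l) := by
          intro h
          have h2' : ¬ ((w.length : Int) = l) := by simpa using h2
          omega
        simp [this]

-- A's second loop is a filter
lemma a_second_loop (ws : List String) (long : Int) (acc : List String) :
    ws.foldl (pvCollectStep long) acc
    = acc ++ ws.filter (fun w => PySem.Str.len w = long) := by
  induction ws generalizing acc with
  | nil => simp
  | cons w ws ih =>
    rw [List.foldl_cons, List.filter_cons]
    by_cases h : PySem.Str.len w = long
    · have hc : pvCollectStep long acc w = acc ++ [w] := by
        unfold pvCollectStep; simp only [if_pos h]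
      rw [hc, ih]
      have h' : (w.length : Int) = long := by simpa using h
      simp [h']
    · have hc : pvCollectStep long acc w = acc := by
        unfold pvCollectStep; simp only [if_neg h]
      rw [hc, ih]
      have h' : ¬ ((w.length : Int) = long) := by simpa using h
      simp [h']

-- ===== VERDICT (by name: the statement is the Claim_ definition above) =====
theorem all_the_longest_spec : Claim_equal_all_the_longest := by
  intro words _ hpre
  unfold Spec_all_the_longest
  match words with
  | [] => exact absurd rfl hpre
  | w0 :: ws =>
    show all_the_longest (w0 :: ws) = all_the_longest_alt (w0 :: ws)
    show (w0 :: ws).foldl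
        (pvCollectStep ((w0 :: ws).foldl pvMaxStep (PySem.Str.len w0))) []
      = ((w0 :: ws).foldl pvBStep (PySem.Str.len w0, [])).2
    rw [a_second_loop, alt_foldl_spec]
    simp only [List.nil_append]
    split_ifs <;> rfl
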